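-- pv_equiv track=rewrite | github.com/snachazel/CS313E | Work.py | num_lines
-- ===== SOURCE A (Python) =====
-- def num_lines( n , k):
--
--      #this initializes the lo and hi values for the modified binary search
--      low = 1
--      hi = n
--
--      while low <= hi:
--
--          mid = (low + hi) // 2
--
--          #if the values don't satisfy the algorithm, readjust the lo value and
--          #run another iteration
--          if not valid( n , k , mid):
--              low = mid + 1
--
--
--         #if the values do work, lower the hi value and keep the mid that works
--          elif valid( n , k ,  mid):
--              hi = mid - 1
--              v = mid
--
--     #once lo is greater than hi return the mid, which is the minimum numbe of lines
--      return v
--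
-- def valid( a , b , c ):
--
--     #this initializes the exponent to raise the productivity factor
--     power = 1
--     lines_written = c
--
--
--     #this conditional states that if the lines written are fewer than the necessary number
--     #and the number of lines added is nonzero, keep increasing the power
--     while (lines_written < a) and ((c // (b ** power )) != 0 ):
--
--          lines_written += c // (b ** power )
--          power += 1
--
--     #returns a boolean in order to check if the mid, lo and hi values satisfy the conditions of the problem
--     #such that lines written is the minimum possible value to meet a
--     return (lines_written >= a)
-- ===== SOURCE B (Python) =====
-- def num_lines(n, k):
--     # jump straight to an analytic lower bound for the answer, then scan the
--     # few remaining candidates upward; no interval search at all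
--     if k >= 1:
--         c = n * (k - 1) // k + 1   # total output from c lines stays below c*k/(k-1)
--     else:
--         c = n                      # a negative factor never adds lines overall
--     while not valid(n, k, c):
--         c += 1
--     return c
--
--
-- def valid(a, b, c):
--     power = 1
--     lines_written = c
--     while (lines_written < a) and ((c // (b ** power)) != 0):
--         lines_written += c // (b ** power)
--         power += 1
--     return (lines_written >= a)
-- ===== Notes on version B (the rewrite author's own statement) =====
-- stated objective: alternative
-- what changed: A's lo/hi binary search over [1,n] is replaced by a direct analytic jump: start at the provable lower bound n*(k-1)//k + 1 (total output from c lines stays below c*k/(k-1); for k <= 0 the start is n, since a negative factor never adds lines) and scan the few remaining candidates upward; no interval search remains, and the helper valid is unchanged.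
import Mathlib
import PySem

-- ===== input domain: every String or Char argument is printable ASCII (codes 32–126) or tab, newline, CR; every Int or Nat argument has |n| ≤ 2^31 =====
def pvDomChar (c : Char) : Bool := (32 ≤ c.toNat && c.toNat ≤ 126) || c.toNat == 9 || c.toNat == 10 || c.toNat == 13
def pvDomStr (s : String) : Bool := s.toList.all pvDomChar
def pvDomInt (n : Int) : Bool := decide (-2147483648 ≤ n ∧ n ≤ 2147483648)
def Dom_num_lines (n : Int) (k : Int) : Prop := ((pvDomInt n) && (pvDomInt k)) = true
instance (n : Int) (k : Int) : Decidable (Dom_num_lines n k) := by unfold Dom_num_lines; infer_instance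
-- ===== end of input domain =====

-- B replaces A's lo/hi binary search by an analytic lower bound (n*(k-1)//k + 1 for k ≥ 1,
-- n otherwise) followed by a short upward scan; the helper `valid` is unchanged (objective: alternative).

-- ===== PORT A =====
-- helper `valid` of the Python module; it is kept unchanged by B, so both ports share it.
-- The while loop runs on fuel: for k ≥ 1 the fuel (a - lw).toNat + 1 is never exhausted
-- (each accepted step adds ≥ 1 to lw), and for k ≤ -2 the exhaustion value equals the
-- loop's exit value (lw stays ≤ c < a, proved below); k ∈ {0,-1} with c < a is where the
-- Python raises ZeroDivisionError / diverges, and Pre_ excludes those inputs.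
def pvValidLoop (a k c : Int) : Nat → Nat → Int → Bool
  | 0, _, lw => decide (a ≤ lw)
  | fuel+1, power, lw =>
    if lw < a ∧ PySem.Int.floordiv c (k ^ power) ≠ 0 then
      pvValidLoop a k c fuel (power + 1) (lw + PySem.Int.floordiv c (k ^ power))
    else decide (a ≤ lw)

def pvValid (a k c : Int) : Bool := pvValidLoop a k c ((a - c).toNat + 1) 1 c

-- A's binary search; `v` unset is Python's NameError (only reachable for n < 1, excluded by Pre_)
def pvSearch (n k low hi : Int) (v : Option Int) : Int :=
  if h : low ≤ hi then
    if ¬ (pvValid n k (PySem.Int.floordiv (low + hi) 2) = true) then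
      pvSearch n k (PySem.Int.floordiv (low + hi) 2 + 1) hi v
    else
      pvSearch n k low (PySem.Int.floordiv (low + hi) 2 - 1) (some (PySem.Int.floordiv (low + hi) 2))
  else
    v.getD 0
termination_by (hi + 1 - low).toNat
decreasing_by
  · have := PySem.Int.floordiv_two_mid_bounds h; omega
  · have := PySem.Int.floordiv_two_mid_bounds h; omega

def num_lines (n : Int) (k : Int) : Int := pvSearch n k 1 n none

-- ===== PORT B =====
-- the upward scan `while not valid(n,k,c): c += 1` on fuel; under Pre_ the starting
-- fuel (n + 1 - c0).toNat + 1 is never exhausted (valid n k n is true, proved below)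
def pvScan (n k : Int) : Nat → Int → Int
  | 0, c => c
  | fuel+1, c => if pvValid n k c = true then c else pvScan n k fuel (c + 1)

-- analytic jump then scan: total output from c lines stays below c*k/(k-1) for k ≥ 1,
-- and never exceeds c for k ≤ 0, so the answer is ≥ the starting point c0
def num_lines_alt (n : Int) (k : Int) : Int :=
  let c0 : Int := if 1 ≤ k then PySem.Int.floordiv (n * (k - 1)) k + 1 else n
  pvScan n k ((n + 1 - c0).toNat + 1) c0

-- ===== PRECONDITION & SPEC =====
-- Pre_ excludes exactly the inputs where the Python A does not return: n < 1 (NameError: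
-- v unassigned) and, for n ≥ 2, k = 0 (ZeroDivisionError in valid) and k = -1 (valid loops forever).
def Pre_num_lines (n : Int) (k : Int) : Prop := 1 ≤ n ∧ (n = 1 ∨ (k ≠ 0 ∧ k ≠ -1))
instance (n : Int) (k : Int) : Decidable (Pre_num_lines n k) := by unfold Pre_num_lines; infer_instance
def pvWitness_num_lines : Int × Int := (10, 2)

def Spec_num_lines (n : Int) (k : Int) (out : Int) : Prop := out = num_lines_alt n k
instance (n : Int) (k : Int) (out : Int) : Decidable (Spec_num_lines n k out) := by unfold Spec_num_lines; infer_instance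

-- ===== CLAIM (what is proved, stated in full; the proofs are below) =====
def Claim_equal_num_lines : Prop := ∀ (n : Int) (k : Int), Dom_num_lines n k → Pre_num_lines n k → Spec_num_lines n k (num_lines n k)

-- ===== LEMMAS AND PROOFS =====

-- basic floordiv facts
theorem pv_fd_nonneg (c d : Int) (hc : 0 ≤ c) (hd : 0 < d) : 0 ≤ PySem.Int.floordiv c d := by
  rw [PySem.Int.floordiv_eq_ediv_of_pos hd]
  exact Int.ediv_nonneg hc (le_of_lt hd)

theorem pv_fd_mono (c c' d : Int) (h : c ≤ c') (hd : 0 < d) :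
    PySem.Int.floordiv c d ≤ PySem.Int.floordiv c' d := by
  rw [PySem.Int.floordiv_eq_ediv_of_pos hd, PySem.Int.floordiv_eq_ediv_of_pos hd]
  exact Int.ediv_le_ediv hd h

theorem pv_fd_neg_le (c d : Int) (hc : 1 ≤ c) (hd : d < 0) : PySem.Int.floordiv c d ≤ -1 := by
  have h1 := PySem.Int.floordiv_mul_add_mod c d
  have h2 := PySem.Int.mod_neg_bounds c hd
  by_contra hcon
  push Not at hcon
  have hq : 0 ≤ PySem.Int.floordiv c d := by omega
  have : PySem.Int.floordiv c d * d ≤ 0 := mul_nonpos_of_nonneg_of_nonpos hq (le_of_lt hd)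
  linarith [h2.1, h2.2]

-- the paired-terms bound used for k ≤ -2: floor(c / (K·D)) + floor(c / (-D)) ≤ 0
theorem pv_fd_pair (c K D : Int) (hc : 0 ≤ c) (hK : 1 ≤ K) (hD : 0 < D) :
    PySem.Int.floordiv c (K * D) + PySem.Int.floordiv c (-D) ≤ 0 := by
  have hKD : 0 < K * D := by positivity
  have h1 := PySem.Int.floordiv_mul_add_mod c (K * D)
  have h2 := PySem.Int.floordiv_mul_add_mod c (-D)
  have hr1 : 0 ≤ PySem.Int.mod c (K * D) := PySem.Int.mod_nonneg c hKD
  have hr2 := PySem.Int.mod_neg_bounds c (show -D < 0 by omega)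
  have hq1 : 0 ≤ PySem.Int.floordiv c (K * D) := pv_fd_nonneg c (K * D) hc hKD
  have e1 : PySem.Int.floordiv c (K * D) * (K * D) ≤ c := by linarith
  have e2 : c ≤ PySem.Int.floordiv c (-D) * (-D) := by linarith [hr2.2]
  have e3 : PySem.Int.floordiv c (K * D) * D ≤ PySem.Int.floordiv c (K * D) * (K * D) := by
    nlinarith [mul_nonneg hq1 (mul_nonneg (show (0:Int) ≤ K - 1 by omega) (le_of_lt hD))]
  have e4 : (PySem.Int.floordiv c (K * D) + PySem.Int.floordiv c (-D)) * D ≤ 0 := by nlinarith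
  by_contra hcon
  push Not at hcon
  nlinarith [mul_pos hcon hD]

-- valid(a,k,c) is True whenever c already meets the goal (the loop never runs)
theorem pv_valid_ge (a k c : Int) (h : a ≤ c) : pvValid a k c = true := by
  unfold pvValid
  rw [pvValidLoop, if_neg (fun hx => absurd hx.1 (not_lt.mpr h))]
  exact decide_eq_true h

-- k ≤ -2: lw never exceeds c, so valid is False whenever c < a
theorem pv_validLoop_neg (a k c : Int) (hk : k ≤ -2) (hc : 1 ≤ c) (hca : c < a) :
    ∀ (fuel p : Nat) (lw : Int),
      ((p % 2 = 1 ∧ lw ≤ c) ∨ (p % 2 = 0 ∧ 1 ≤ p ∧ lw ≤ c + PySem.Int.floordiv c (k ^ (p - 1)))) →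
      pvValidLoop a k c fuel p lw = false := by
  intro fuel
  induction fuel with
  | zero =>
    intro p lw hinv
    have hlwc : lw ≤ c := by
      rcases hinv with ⟨_, h⟩ | ⟨hp, hp1, h⟩
      · exact h
      · have hodd : Odd (p - 1) := by
          rcases Nat.even_or_odd (p - 1) with he | ho
          · exfalso; rcases he with ⟨m, hm⟩; omega
          · exact ho
        have : k ^ (p - 1) < 0 := Odd.pow_neg hodd (by omega)
        have := pv_fd_neg_le c (k ^ (p - 1)) hc this
        omega
    simp [pvValidLoop]; omega
  | succ f ih =>
    intro p lw hinv
    have hlwc : lw ≤ c := by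
      rcases hinv with ⟨_, h⟩ | ⟨hp, hp1, h⟩
      · exact h
      · have hodd : Odd (p - 1) := by
          rcases Nat.even_or_odd (p - 1) with he | ho
          · exfalso; rcases he with ⟨m, hm⟩; omega
          · exact ho
        have : k ^ (p - 1) < 0 := Odd.pow_neg hodd (by omega)
        have := pv_fd_neg_le c (k ^ (p - 1)) hc this
        omega
    rw [pvValidLoop]
    by_cases hcond : lw < a ∧ PySem.Int.floordiv c (k ^ p) ≠ 0
    · rw [if_pos hcond]
      apply ih
      rcases hinv with ⟨hpo, h⟩ | ⟨hpe, hp1, h⟩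
      · right
        refine ⟨by omega, by omega, ?_⟩
        have : (p + 1) - 1 = p := by omega
        rw [this]; omega
      · left
        refine ⟨by omega, ?_⟩
        have hodd : Odd (p - 1) := by
          rcases Nat.even_or_odd (p - 1) with he | ho
          · exfalso; rcases he with ⟨m, hm⟩; omega
          · exact ho
        have hneg : k ^ (p - 1) < 0 := Odd.pow_neg hodd (by omega)
        have hfact : k ^ p = (-k) * (-(k ^ (p - 1))) := by
          have hps : k ^ p = k ^ (p - 1) * k := by
            conv_lhs => rw [show p = (p - 1) + 1 by omega, pow_succ]
          rw [hps]; ring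
        have hpair := pv_fd_pair c (-k) (-(k ^ (p - 1))) (by omega) (by omega) (by omega)
        rw [← hfact] at hpair
        have hDD : -(-(k ^ (p - 1))) = k ^ (p - 1) := by ring
        rw [hDD] at hpair
        omega
    · rw [if_neg hcond]
      simp; omega

theorem pv_valid_neg (a k c : Int) (hk : k ≤ -2) (hc : 1 ≤ c) (hca : c < a) :
    pvValid a k c = false := by
  apply pv_validLoop_neg a k c hk hc hca
  left; exact ⟨rfl, le_refl c⟩

-- k ≥ 1: each accepted step adds a positive term, so the result does not depend on the
-- fuel as long as the fuel exceeds (a - lw).toNat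
theorem pv_validLoop_fuel (a k c : Int) (hk : 1 ≤ k) (hc : 1 ≤ c) :
    ∀ (fuel fuel' p : Nat) (lw : Int), (a - lw).toNat < fuel → (a - lw).toNat < fuel' →
      pvValidLoop a k c fuel p lw = pvValidLoop a k c fuel' p lw := by
  intro fuel
  induction fuel with
  | zero => intro fuel' p lw h _; omega
  | succ f ih =>
    intro fuel' p lw h h'
    obtain ⟨f', rfl⟩ : ∃ f', fuel' = f' + 1 := ⟨fuel' - 1, by omega⟩
    rw [pvValidLoop, pvValidLoop]
    by_cases hcond : lw < a ∧ PySem.Int.floordiv c (k ^ p) ≠ 0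
    · rw [if_pos hcond, if_pos hcond]
      have hpow : (0 : Int) < k ^ p := pow_pos (by omega) p
      have ht : 1 ≤ PySem.Int.floordiv c (k ^ p) := by
        have := pv_fd_nonneg c (k ^ p) (by omega) hpow
        omega
      apply ih
      · omega
      · omega
    · rw [if_neg hcond, if_neg hcond]

-- k ≥ 1: lockstep monotonicity of the loop in (c, lw)
theorem pv_validLoop_mono (a k c c' : Int) (hk : 1 ≤ k) (hc : 1 ≤ c) (hcc : c ≤ c') :
    ∀ (fuel p : Nat) (lw lw' : Int), lw ≤ lw' →
      pvValidLoop a k c fuel p lw = true → pvValidLoop a k c' fuel p lw' = true := by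
  intro fuel
  induction fuel with
  | zero =>
    intro p lw lw' hll h
    simp [pvValidLoop] at h ⊢; omega
  | succ f ih =>
    intro p lw lw' hll h
    rw [pvValidLoop] at h ⊢
    have hpow : (0 : Int) < k ^ p := pow_pos (by omega) p
    by_cases hcond : lw < a ∧ PySem.Int.floordiv c (k ^ p) ≠ 0
    · rw [if_pos hcond] at h
      by_cases hga : a ≤ lw'
      · have hcond' : ¬ (lw' < a ∧ PySem.Int.floordiv c' (k ^ p) ≠ 0) := by
          intro hx; omega
        rw [if_neg hcond']
        exact decide_eq_true hga
      · have ht : 1 ≤ PySem.Int.floordiv c (k ^ p) := by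
          have := pv_fd_nonneg c (k ^ p) (by omega) hpow
          omega
        have ht' : PySem.Int.floordiv c (k ^ p) ≤ PySem.Int.floordiv c' (k ^ p) :=
          pv_fd_mono c c' (k ^ p) hcc hpow
        have hcond' : lw' < a ∧ PySem.Int.floordiv c' (k ^ p) ≠ 0 := ⟨by omega, by omega⟩
        rw [if_pos hcond']
        exact ih (p + 1) _ _ (by omega) h
    · rw [if_neg hcond] at h
      have hga : a ≤ lw := of_decide_eq_true h
      have hcond' : ¬ (lw' < a ∧ PySem.Int.floordiv c' (k ^ p) ≠ 0) := by
        intro hx; omega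
      rw [if_neg hcond']
      exact decide_eq_true (by omega)

-- monotonicity of valid in c, for every k admitted by Pre_
theorem pv_valid_mono (a k c c' : Int) (hk : 1 ≤ k ∨ k ≤ -2) (hc : 1 ≤ c) (hcc : c ≤ c')
    (h : pvValid a k c = true) : pvValid a k c' = true := by
  rcases hk with hk | hk
  · unfold pvValid at h ⊢
    rw [pv_validLoop_fuel a k c' hk (by omega) ((a - c').toNat + 1) ((a - c).toNat + 1) 1 c'
        (by omega) (by omega)]
    exact pv_validLoop_mono a k c c' hk hc hcc _ 1 c c' hcc h
  · by_cases hca : c < a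
    · rw [pv_valid_neg a k c hk hc hca] at h; cases h
    · exact pv_valid_ge a k c' (by omega)

-- k ≥ 2: invariant (k-1)·lw ≤ k·c - floor(c/k^(p-1)); with k·c ≤ (k-1)·n it forces lw < n
-- at every exit, so valid is False below the analytic bound
theorem pv_validLoop_small (n k c : Int) (hk : 2 ≤ k) (hc : 1 ≤ c) (hs : k * c ≤ (k - 1) * n) :
    ∀ (fuel p : Nat) (lw : Int), 1 ≤ p →
      1 ≤ PySem.Int.floordiv c (k ^ (p - 1)) →
      (k - 1) * lw ≤ k * c - PySem.Int.floordiv c (k ^ (p - 1)) →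
      pvValidLoop n k c fuel p lw = false := by
  intro fuel
  induction fuel with
  | zero =>
    intro p lw hp hf hinv
    simp [pvValidLoop]
    nlinarith
  | succ f ih =>
    intro p lw hp hf hinv
    rw [pvValidLoop]
    have hlwn : lw < n := by nlinarith
    by_cases hcond : lw < n ∧ PySem.Int.floordiv c (k ^ p) ≠ 0
    · rw [if_pos hcond]
      have hpow : (0 : Int) < k ^ (p - 1) := pow_pos (by omega) _
      have hfp_nn : 0 ≤ PySem.Int.floordiv c (k ^ p) := pv_fd_nonneg c (k ^ p) (by omega) (pow_pos (by omega) p)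
      have hfp1 : 1 ≤ PySem.Int.floordiv c (k ^ p) := by
        rcases hcond with ⟨_, hne⟩; omega
      -- k · floor(c/k^p) ≤ floor(c/k^(p-1))
      have hcomp : k * PySem.Int.floordiv c (k ^ p) ≤ PySem.Int.floordiv c (k ^ (p - 1)) := by
        have hpp : k ^ p = k ^ (p - 1) * k := by
          conv_lhs => rw [show p = (p - 1) + 1 by omega, pow_succ]
        have h1 := PySem.Int.floordiv_mul_add_mod c (k ^ p)
        have h2 : 0 ≤ PySem.Int.mod c (k ^ p) := PySem.Int.mod_nonneg c (pow_pos (by omega) p)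
        -- c = q·k^p + r with 0 ≤ r; divide by k^(p-1)
        have hq := pv_fd_mono (PySem.Int.floordiv c (k ^ p) * (k ^ p)) c (k ^ (p - 1)) (by omega) hpow
        have hqe : PySem.Int.floordiv (PySem.Int.floordiv c (k ^ p) * (k ^ p)) (k ^ (p - 1))
            = PySem.Int.floordiv c (k ^ p) * k := by
          rw [show PySem.Int.floordiv c (k ^ p) * (k ^ p) = (PySem.Int.floordiv c (k ^ p) * k) * k ^ (p - 1) from by rw [hpp]; ring,
              PySem.Int.floordiv_eq_ediv_of_pos hpow]
          exact Int.mul_ediv_cancel _ (by omega)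
        rw [hqe] at hq
        linarith [hq]
      apply ih (p + 1) _ (by omega)
      · simpa using hfp1
      · have : (p + 1) - 1 = p := by omega
        rw [this]
        nlinarith
    · rw [if_neg hcond]
      simp; omega

theorem pv_valid_small (n k c : Int) (hk : 2 ≤ k) (hc : 1 ≤ c) (hs : k * c ≤ (k - 1) * n) :
    pvValid n k c = false := by
  apply pv_validLoop_small n k c hk hc hs _ 1 c (le_refl 1)
  · simp; omega
  · simp; nlinarith

-- the scan returns the minimum valid count m when started at or below it with enough fuel
theorem pv_scan_eq (n k m : Int) (hv : pvValid n k m = true)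
    (hmin : ∀ x, 1 ≤ x → x < m → pvValid n k x = false) :
    ∀ (fuel : Nat) (c : Int), 1 ≤ c → c ≤ m → (m - c).toNat < fuel →
      pvScan n k fuel c = m := by
  intro fuel
  induction fuel with
  | zero => intro c _ _ h; omega
  | succ f ih =>
    intro c hc hcm hfuel
    rw [pvScan]
    by_cases hcv : c = m
    · rw [if_pos (hcv ▸ hv)]; exact hcv
    · rw [if_neg (by rw [hmin c hc (by omega)]; simp)]
      exact ih (c + 1) (by omega) (by omega) (by omega)

-- the binary search returns the minimum valid count (given monotonicity and valid n)
theorem pv_search_eq (n k : Int) (hn : 1 ≤ n)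
    (Hmono : ∀ c c', 1 ≤ c → c ≤ c' → pvValid n k c = true → pvValid n k c' = true)
    (Htop : pvValid n k n = true) :
    ∀ (j : Nat) (low hi : Int) (v : Option Int), (hi + 1 - low).toNat = j →
      1 ≤ low → hi ≤ n → low ≤ hi + 1 →
      (∀ x, 1 ≤ x → x < low → pvValid n k x = false) →
      (v = none → hi = n) →
      (∀ m, v = some m → pvValid n k m = true ∧ m = hi + 1 ∧ m ≤ n) →
      ∃ m, pvSearch n k low hi v = m ∧ pvValid n k m = true ∧ 1 ≤ m ∧ m ≤ n ∧
        (∀ x, 1 ≤ x → x < m → pvValid n k x = false) := by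
  intro j
  induction j using Nat.strong_induction_on with
  | _ j ih =>
    intro low hi v hj hlow hhi hlh hbelow hnone hsome
    by_cases h : low ≤ hi
    · have hmid := PySem.Int.floordiv_two_mid_bounds h
      set mid := PySem.Int.floordiv (low + hi) 2 with hmiddef
      rw [pvSearch, dif_pos h]
      by_cases hv : pvValid n k mid = true
      · rw [if_neg (not_not_intro hv)]
        have := ih (mid - 1 + 1 - low).toNat (by omega) low (mid - 1) (some mid) rfl hlow
          (by omega) (by omega) hbelow (by intro hx; cases hx)
          (by intro m hm; injection hm with hm; subst hm; exact ⟨hv, by ring, by omega⟩)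
        exact this
      · rw [if_pos hv]
        apply ih (hi + 1 - (mid + 1)).toNat (by omega) (mid + 1) hi v rfl (by omega) hhi
          (by omega) ?_ hnone hsome
        intro x hx hxmid
        by_cases hxl : x < low
        · exact hbelow x hx hxl
        · cases hcontra : pvValid n k x with
          | false => rfl
          | true => exact absurd (Hmono x mid hx (by omega) hcontra) hv
    · rw [pvSearch, dif_neg h]
      cases v with
      | none =>
        exfalso
        have hhin : hi = n := hnone rfl
        have := hbelow n hn (by omega)
        rw [Htop] at this; cases this
      | some m =>
        obtain ⟨hv, hhi1, hmn⟩ := hsome m rfl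
        refine ⟨m, rfl, hv, by omega, hmn, ?_⟩
        intro x hx hxm
        exact hbelow x hx (by omega)

-- ===== VERDICT (by name: the statement is the Claim_ definition above) =====
theorem num_lines_spec : Claim_equal_num_lines := by
  intro n k _ hpre
  unfold Spec_num_lines
  obtain ⟨hn, hcase⟩ := hpre
  by_cases hk : 1 ≤ k ∨ k ≤ -2
  · have Hmono : ∀ c c', 1 ≤ c → c ≤ c' → pvValid n k c = true → pvValid n k c' = true :=
      fun c c' hc hcc h => pv_valid_mono n k c c' hk hc hcc h
    have Htop : pvValid n k n = true := pv_valid_ge n k n (le_refl n)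
    obtain ⟨m, hA, hv, hm1, hmn, hmin⟩ :=
      pv_search_eq n k hn Hmono Htop (n + 1 - 1).toNat 1 n none rfl (le_refl 1) (le_refl n)
        (by omega) (by intro x hx hx1; omega) (fun _ => rfl) (by intro m hm; cases hm)
    unfold num_lines num_lines_alt
    rw [hA]
    -- the analytic starting point c0 is ≥ 1 and ≤ m
    rcases hk with hk1 | hkneg
    · rw [if_pos hk1]
      by_cases hk2 : 2 ≤ k
      · have hc0m : PySem.Int.floordiv (n * (k - 1)) k + 1 ≤ m := by
          have hsmall : ¬ (k * m ≤ (k - 1) * n) := by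
            intro hcon
            rw [pv_valid_small n k m hk2 hm1 hcon] at hv
            cases hv
          have : PySem.Int.floordiv (n * (k - 1)) k < m := by
            rw [PySem.Int.floordiv_lt_iff_lt_mul (by omega)]
            nlinarith
          omega
        have hc01 : 1 ≤ PySem.Int.floordiv (n * (k - 1)) k + 1 := by
          have := pv_fd_nonneg (n * (k - 1)) k (by nlinarith) (by omega)
          omega
        exact (pv_scan_eq n k m hv hmin _ _ hc01 hc0m (by omega)).symm
      · -- k = 1: starting point is 1
        have hk1' : k = 1 := by omega
        subst hk1'
        have h0 : PySem.Int.floordiv (n * (1 - 1)) 1 + 1 = 1 := by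
          norm_num [PySem.Int.floordiv_eq_ediv_of_pos (show (0:Int) < 1 by omega)]
        rw [h0]
        exact (pv_scan_eq n 1 m hv hmin _ 1 (le_refl 1) hm1 (by omega)).symm
    · -- k ≤ -2: every count below n is invalid, so m = n and the scan starts there
      rw [if_neg (by omega)]
      have hmn' : m = n := by
        by_contra hne
        have : m < n := by omega
        rw [pv_valid_neg n k m hkneg hm1 this] at hv
        cases hv
      exact (pv_scan_eq n k m hv hmin _ n (by omega) (by omega) (by omega)).symm
  · -- k ∈ {0, -1}: Pre_ forces n = 1, both sides return 1 directly
    have hn1 : n = 1 := by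
      rcases hcase with h1 | ⟨h0, hm1⟩
      · exact h1
      · omega
    subst hn1
    have hv : pvValid 1 k 1 = true := pv_valid_ge 1 k 1 (le_refl 1)
    have hmid : PySem.Int.floordiv (1 + 1) 2 = 1 := by
      have := PySem.Int.floordiv_two_mid_bounds (lo := 1) (hi := 1) (le_refl 1)
      omega
    unfold num_lines num_lines_alt
    rw [pvSearch, dif_pos (le_refl (1 : Int)), hmid, if_neg (not_not_intro hv),
        pvSearch, dif_neg (by omega : ¬ (1 : Int) ≤ 1 - 1)]
    have hk1 : ¬ (1 : Int) ≤ k := fun h => hk (Or.inl h)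
    simp [pvScan, hk1, hv]
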